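-- pv_equiv track=rewrite | github.com/JanKesek/python-algorithm-automata-libraries | nnetworks.py | autom
-- ===== SOURCE A (Python) =====
-- def autom(string):
-- 	i=0
-- 	a=False
-- 	while i<len(string):
-- 		if string[i]=='a':
-- 			a=True
-- 			i+=1
-- 		elif string[i]=='b':
-- 			a=True
-- 			i+=1
-- 			if i<len(string):
-- 				if string[i]=='c':
-- 					a=True
-- 					i+=1
-- 		else: i+=1
-- 	return a
-- ===== SOURCE B (Python) =====
-- def autom(string):
--     return 'a' in string or 'b' in string
-- ===== Notes on version B (the rewrite author's own statement) =====
-- stated objective: simpler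
-- what changed: Replaced the indexed while-loop with its accumulator flag and b/c skip logic by two built-in substring membership tests combined with or.
import Mathlib
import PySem

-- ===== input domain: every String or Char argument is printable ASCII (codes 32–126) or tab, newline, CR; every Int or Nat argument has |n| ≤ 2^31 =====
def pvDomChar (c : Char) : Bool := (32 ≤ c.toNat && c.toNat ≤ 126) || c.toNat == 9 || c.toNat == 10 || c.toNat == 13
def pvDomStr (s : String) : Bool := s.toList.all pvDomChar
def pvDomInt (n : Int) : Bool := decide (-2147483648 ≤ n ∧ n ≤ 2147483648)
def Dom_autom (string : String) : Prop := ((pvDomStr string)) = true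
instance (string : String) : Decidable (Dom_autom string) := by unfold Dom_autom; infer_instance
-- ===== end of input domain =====

-- B replaces A's indexed while-loop (flag accumulator plus b/c skip) by two membership tests: simpler.

-- ===== PORT A =====
-- literal transliteration of A's while loop: index i, flag a; the 'b' branch may consume a following 'c'.
-- fuel (≥ remaining iterations, i advances by ≥1 each pass) only makes the recursion structural.
def automLoop (s : List Char) (i : Nat) (a : Bool) (fuel : Nat) : Bool :=
  match fuel with
  | 0 => a
  | fuel + 1 =>
    if h : i < s.length then
      if s[i] = 'a' then automLoop s (i + 1) true fuel
      else if s[i] = 'b' then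
        -- a=True; i+=1; then possibly skip a following 'c'
        if h2 : i + 1 < s.length then
          if s[i + 1] = 'c' then automLoop s (i + 2) true fuel
          else automLoop s (i + 1) true fuel
        else automLoop s (i + 1) true fuel
      else automLoop s (i + 1) a fuel
    else a

def autom (string : String) : Bool := automLoop string.toList 0 false string.toList.length

-- ===== PORT B =====
def autom_alt (string : String) : Bool := string.toList.contains 'a' || string.toList.contains 'b'

-- ===== PRECONDITION & SPEC =====
def Spec_autom (string : String) (out : Bool) : Prop := out = autom_alt string
instance (string : String) (out : Bool) : Decidable (Spec_autom string out) := by unfold Spec_autom; infer_instance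

-- ===== CLAIM (what is proved, stated in full; the proofs are below) =====
def Claim_equal_autom : Prop := ∀ (string : String), Dom_autom string → Spec_autom string (autom string)

-- ===== LEMMAS AND PROOFS =====

theorem automLoop_eq (fuel : Nat) (s : List Char) (i : Nat) (a : Bool)
    (hf : s.length - i ≤ fuel) :
    automLoop s i a fuel = (a || (s.drop i).any (fun c => c = 'a' || c = 'b')) := by
  induction fuel generalizing i a with
  | zero =>
    have hnil : s.drop i = [] := List.drop_eq_nil_of_le (by omega)
    simp [automLoop, hnil]
  | succ fuel ih =>
    by_cases h : i < s.length
    · have hd : s.drop i = s[i] :: s.drop (i + 1) := List.drop_eq_getElem_cons h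
      rw [automLoop]
      simp only [dif_pos h]
      by_cases ha : s[i] = 'a'
      · simp only [if_pos ha]
        rw [ih (i+1) true (by omega), hd]
        simp [ha]
      · simp only [if_neg ha]
        by_cases hb : s[i] = 'b'
        · simp only [if_pos hb]
          by_cases h2 : i + 1 < s.length
          · simp only [dif_pos h2]
            by_cases hc : s[i+1] = 'c'
            · simp only [if_pos hc]
              rw [ih (i+2) true (by omega), hd]
              simp [hb]
            · simp only [if_neg hc]
              rw [ih (i+1) true (by omega), hd]
              simp [hb]
          · simp only [dif_neg h2]
            rw [ih (i+1) true (by omega), hd]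
            simp [hb]
        · simp only [if_neg hb]
          rw [ih (i+1) a (by omega), hd, List.any_cons]
          simp [ha, hb]
    · have hnil : s.drop i = [] := List.drop_eq_nil_of_le (by omega)
      rw [automLoop]
      simp [dif_neg h, hnil]

theorem any_eq_contains (l : List Char) :
    l.any (fun c => c = 'a' || c = 'b') = (l.contains 'a' || l.contains 'b') := by
  induction l with
  | nil => simp
  | cons c t ih =>
    simp only [List.any_cons, List.contains_cons, ih]
    by_cases hc : c = 'a' <;> by_cases hb : c = 'b'
    · simp [hc]
    · simp [hc]
    · simp [hb, eq_comm]
    · have h1 : ('a' == c) = false := beq_eq_false_iff_ne.mpr (Ne.symm hc)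
      have h2 : ('b' == c) = false := beq_eq_false_iff_ne.mpr (Ne.symm hb)
      simp [h1, h2, hc, hb]

-- ===== VERDICT (by name: the statement is the Claim_ definition above) =====
theorem autom_spec : Claim_equal_autom := by
  intro s _
  unfold Spec_autom autom autom_alt
  rw [automLoop_eq _ _ _ _ (by omega), any_eq_contains]
  simp
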